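-- pv_equiv track=rewrite | github.com/catcherxiao/wechat_article | tools/md_to_wechat_html.py | render_inline
-- ===== SOURCE A (Python) =====
-- def escape_html(s: str) -> str:
--     return (
--         s.replace("&", "&amp;")
--         .replace("<", "&lt;")
--         .replace(">", "&gt;")
--         .replace('"', "&quot;")
--         .replace("'", "&#39;")
--     )
--
-- def render_inline(s: str, strong_color: str) -> str:
--     out = []
--     i = 0
--     strong = False
--     while i < len(s):
--         if s.startswith("**", i):
--             strong = not strong
--             out.append(
--                 "</strong>"
--                 if not strong
--                 else f'<strong style="font-weight: 800; color: {strong_color};">'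
--             )
--             i += 2
--             continue
--         out.append(escape_html(s[i]))
--         i += 1
--     if strong:
--         out.append("</strong>")
--     return "".join(out)
-- ===== SOURCE B (Python) =====
-- def escape_html(s: str) -> str:
--     return (
--         s.replace("&", "&amp;")
--         .replace("<", "&lt;")
--         .replace(">", "&gt;")
--         .replace('"', "&quot;")
--         .replace("'", "&#39;")
--     )
--
-- def render_inline(s: str, strong_color: str) -> str:
--     open_tag = f'<strong style="font-weight: 800; color: {strong_color};">'
--
--     def glue(rest):
--         # rest = the segments after an opening "**"; pairs of (strong, plain)
--         if not rest:
--             return ""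
--         head = open_tag + escape_html(rest[0]) + "</strong>"
--         if len(rest) == 1:
--             return head
--         return head + escape_html(rest[1]) + glue(rest[2:])
--
--     segments = s.split("**")
--     return escape_html(segments[0]) + glue(segments[1:])
-- ===== Notes on version B (the rewrite author's own statement) =====
-- stated objective: faster
-- what changed: Replaces the character-by-character scan with a toggling strong flag by a split-on-'**' decomposition: escape segment 0, then a recursion that wraps the remaining segments pairwise in <strong>...</strong>, the trailing close tag for an unclosed ** falling out of the odd-length case.
import Mathlib
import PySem

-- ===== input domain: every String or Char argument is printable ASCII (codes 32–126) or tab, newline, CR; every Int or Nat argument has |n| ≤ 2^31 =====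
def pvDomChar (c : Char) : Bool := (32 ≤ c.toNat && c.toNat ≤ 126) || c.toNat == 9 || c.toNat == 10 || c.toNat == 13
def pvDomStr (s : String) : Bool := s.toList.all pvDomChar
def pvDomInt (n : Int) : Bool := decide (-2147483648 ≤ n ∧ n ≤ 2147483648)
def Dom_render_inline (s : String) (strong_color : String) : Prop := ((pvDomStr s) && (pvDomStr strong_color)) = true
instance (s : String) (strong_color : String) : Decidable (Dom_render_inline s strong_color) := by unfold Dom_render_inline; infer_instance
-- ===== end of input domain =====

-- B replaces A's char-by-char scan (toggling a strong flag) by a split-on-"**" decomposition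
-- that wraps the remaining segments pairwise in <strong>…</strong>; bulk segment operations replace per-character work (measured faster).

-- ===== PORT A =====
def escape_html (s : String) : String :=
  PySem.Str.replace (PySem.Str.replace (PySem.Str.replace (PySem.Str.replace
    (PySem.Str.replace s "&" "&amp;") "<" "&lt;") ">" "&gt;") "\"" "&quot;") "'" "&#39;"

-- the f-string tag A builds at each toggle
def openTag (strong_color : String) : String :=
  "<strong style=\"font-weight: 800; color: " ++ strong_color ++ ";\">"

-- A's while loop over i: the remaining characters s[i:], with the strong flag
def renderLoop (strong_color : String) : List Char → Bool → List String
  | [], strong => if strong then ["</strong>"] else []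
  | c :: rest, strong =>
    if PySem.Chars.startswith (c :: rest) ['*', '*'] then
      (if strong then "</strong>" else openTag strong_color)
        :: renderLoop strong_color (rest.drop 1) (!strong)
    else
      escape_html (String.ofList [c]) :: renderLoop strong_color rest strong
termination_by l _ => l.length
decreasing_by all_goals (simp; try omega)

def render_inline (s : String) (strong_color : String) : String :=
  PySem.Str.join "" (renderLoop strong_color s.toList false)

-- ===== PORT B =====
-- B's helper glue: segments after an opening "**", consumed pairwise (strong, plain)
def glueB (open_tag : String) : List String → String
  | [] => ""
  | [a] => open_tag ++ escape_html a ++ "</strong>"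
  | a :: b :: rest =>
    (open_tag ++ escape_html a ++ "</strong>") ++ escape_html b ++ glueB open_tag rest

def render_inline_alt (s : String) (strong_color : String) : String :=
  let segments := (PySem.Str.split? s "**").getD []
  escape_html (segments.headD "") ++ glueB (openTag strong_color) (segments.drop 1)

-- ===== PRECONDITION & SPEC =====
def Spec_render_inline (s : String) (strong_color : String) (out : String) : Prop := out = render_inline_alt s strong_color
instance (s : String) (strong_color : String) (out : String) : Decidable (Spec_render_inline s strong_color out) := by unfold Spec_render_inline; infer_instance

-- ===== CLAIM (what is proved, stated in full; the proofs are below) =====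
def Claim_equal_render_inline : Prop := ∀ (s : String) (strong_color : String), Dom_render_inline s strong_color → Spec_render_inline s strong_color (render_inline s strong_color)

-- ===== LEMMAS AND PROOFS =====

-- per-character html escaping (the composite of A's five replaces)
def esc (c : Char) : List Char :=
  if c == '&' then "&amp;".toList
  else if c == '<' then "&lt;".toList
  else if c == '>' then "&gt;".toList
  else if c == '"' then "&quot;".toList
  else if c == '\'' then "&#39;".toList
  else [c]

def e1 (o : Char) (new : List Char) (c : Char) : List Char := if c == o then new else [c]

def mapHead (f : List Char → List Char) : List (List Char) → List (List Char)
  | [] => []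
  | h :: t => f h :: t

-- the segments of l split on "**" (mirrors Python's non-overlapping left-to-right split)
def segs : List Char → List (List Char)
  | [] => [[]]
  | c :: rest =>
    if PySem.Chars.startswith (c :: rest) ['*', '*'] then
      [] :: segs (rest.drop 1)
    else
      mapHead (c :: ·) (segs rest)
termination_by l => l.length
decreasing_by all_goals (simp; try omega)

-- the tail segments, each preceded by the toggle tag for the current strong state
def tags (sc : String) : Bool → List (List Char) → List Char
  | strong, [] => if strong then "</strong>".toList else []
  | strong, h :: t =>
    (if strong then "</strong>".toList else (openTag sc).toList)
      ++ h.flatMap esc ++ tags sc (!strong) t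

def render' (sc : String) (strong : Bool) : List (List Char) → List Char
  | [] => []
  | h :: t => h.flatMap esc ++ tags sc strong t

theorem replaceGo_single (o : Char) (new : List Char) :
    ∀ (fuel : Nat) (l acc : List Char), l.length ≤ fuel →
      PySem.Chars.replace.go [o] new fuel l acc
        = acc.reverse ++ l.flatMap (e1 o new) := by
  intro fuel
  induction fuel with
  | zero =>
    intro l acc h
    have : l = [] := List.length_eq_zero_iff.mp (Nat.le_zero.mp h)
    subst this
    rw [PySem.Chars.replace.go]; simp
  | succ n ih =>
    intro l acc h
    cases l with
    | nil => rw [PySem.Chars.replace.go] <;> simp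
    | cons c t =>
      rw [PySem.Chars.replace.go]
      by_cases hc : c = o
      · subst hc
        have hp : [c].isPrefixOf (c :: t) = true := by simp [List.isPrefixOf]
        rw [if_pos hp]
        rw [show List.drop ([c].length) (c :: t) = t from by simp]
        rw [ih t (new.reverse ++ acc) (by simpa using Nat.le_of_succ_le_succ h)]
        simp [e1]
      · have hp : [o].isPrefixOf (c :: t) = false := by
          simp [List.isPrefixOf]; exact fun h' => hc (by simp [h'])
        rw [if_neg (by simp [hp])]
        rw [ih t (c :: acc) (by simpa using Nat.le_of_succ_le_succ h)]
        simp [e1, hc]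

theorem replace_single (o : Char) (new l : List Char) :
    PySem.Chars.replace l [o] new = l.flatMap (e1 o new) := by
  rw [PySem.Chars.replace]
  rw [if_neg (by simp)]
  simpa using replaceGo_single o new l.length l [] (le_refl _)

theorem escChain (c : Char) :
    ((((e1 '&' "&amp;".toList c).flatMap (e1 '<' "&lt;".toList)).flatMap
       (e1 '>' "&gt;".toList)).flatMap (e1 '"' "&quot;".toList)).flatMap
       (e1 '\'' "&#39;".toList) = esc c := by
  by_cases h1 : c = '&'
  · subst h1; decide
  by_cases h2 : c = '<'
  · subst h2; decide
  by_cases h3 : c = '>'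
  · subst h3; decide
  by_cases h4 : c = '"'
  · subst h4; decide
  by_cases h5 : c = '\''
  · subst h5; decide
  simp [e1, esc, h1, h2, h3, h4, h5]

theorem escL_chain : ∀ (l : List Char),
    (((((l.flatMap (e1 '&' "&amp;".toList)).flatMap (e1 '<' "&lt;".toList)).flatMap
      (e1 '>' "&gt;".toList)).flatMap (e1 '"' "&quot;".toList)).flatMap
      (e1 '\'' "&#39;".toList)) = l.flatMap esc := by
  intro l
  induction l with
  | nil => rfl
  | cons c t ih =>
    simp only [List.flatMap_cons, List.flatMap_append]
    rw [ih, escChain c]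

theorem escape_toList (s : String) :
    (escape_html s).toList = s.toList.flatMap esc := by
  simp only [escape_html, PySem.Str.toList_replace]
  rw [show ("&".toList) = ['&'] from by decide, show ("<".toList) = ['<'] from by decide,
      show (">".toList) = ['>'] from by decide, show ("\"".toList) = ['"'] from by decide,
      show ("'".toList) = ['\''] from by decide]
  rw [replace_single, replace_single, replace_single, replace_single, replace_single]
  exact escL_chain s.toList

theorem segs_ne_nil : ∀ (l : List Char), segs l ≠ [] := by
  intro l
  induction l using segs.induct with
  | case1 => simp [segs]
  | case2 c rest h ih => rw [segs, if_pos h]; simp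
  | case3 c rest h ih =>
    rw [segs, if_neg h]
    cases hs : segs rest with
    | nil => exact absurd hs ih
    | cons a b => simp [mapHead]

theorem splitOnGo (fuel : Nat) :
    ∀ (l cur : List Char) (acc : List (List Char)), l.length ≤ fuel →
      PySem.Chars.splitOn.go ['*', '*'] fuel l cur acc
        = acc.reverse ++ mapHead (cur.reverse ++ ·) (segs l) := by
  induction fuel with
  | zero =>
    intro l cur acc h
    have : l = [] := List.length_eq_zero_iff.mp (Nat.le_zero.mp h)
    subst this
    rw [PySem.Chars.splitOn.go]
    simp [segs, mapHead]
  | succ n ih =>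
    intro l cur acc h
    cases l with
    | nil => rw [PySem.Chars.splitOn.go] <;> simp [segs, mapHead]
    | cons c rest =>
      rw [PySem.Chars.splitOn.go]
      by_cases hp : PySem.Chars.startswith (c :: rest) ['*', '*'] = true
      · have hp' : List.isPrefixOf ['*', '*'] (c :: rest) = true := hp
        rw [if_pos hp']
        have hlen : (List.drop 1 rest).length ≤ n := by
          simp at h ⊢; omega
        have : List.drop (['*', '*'].length) (c :: rest) = List.drop 1 rest := by simp
        rw [this, ih (List.drop 1 rest) [] (cur.reverse :: acc) hlen]
        rw [segs, if_pos hp]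
        cases hs : segs (rest.drop 1) with
        | nil => exact absurd hs (segs_ne_nil _)
        | cons a b => simp [mapHead]
      · have hp' : ¬ List.isPrefixOf ['*', '*'] (c :: rest) = true := hp
        rw [if_neg hp']
        have hlen : rest.length ≤ n := by simp at h; omega
        rw [ih rest (c :: cur) acc hlen]
        rw [segs, if_neg hp]
        cases hs : segs rest with
        | nil => exact absurd hs (segs_ne_nil _)
        | cons a b => simp [mapHead]

theorem splitOn_eq (l : List Char) :
    PySem.Chars.splitOn l ['*', '*'] = segs l := by
  rw [PySem.Chars.splitOn]
  rw [splitOnGo (l.length + 1) l [] [] (by omega)]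
  cases hs : segs l with
  | nil => exact absurd hs (segs_ne_nil _)
  | cons a b => simp [mapHead]

theorem join_nil_flatten (p : List (List Char)) :
    PySem.Chars.join [] p = p.flatten := by
  induction p with
  | nil => simp [PySem.Chars.join, List.intercalate, List.intersperse]
  | cons h t ih => cases t <;> simp_all [PySem.Chars.join, List.intercalate, List.intersperse]

theorem glueB_toList (sc : String) :
    ∀ (L : List String),
      (glueB (openTag sc) L).toList = tags sc false (L.map String.toList) := by
  intro L
  induction L using glueB.induct with
  | case1 => simp [glueB, tags]
  | case2 a =>
    simp [glueB, tags, escape_toList]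
  | case3 a b rest ih =>
    simp [glueB, tags, escape_toList, ih]

theorem renderLoop_flatten (sc : String) :
    ∀ (l : List Char) (strong : Bool),
      ((renderLoop sc l strong).map String.toList).flatten
        = render' sc strong (segs l) := by
  intro l strong
  induction l, strong using renderLoop.induct with
  | case1 => simp [renderLoop, segs, render', tags]
  | case2 strong h => simp [renderLoop, segs, render', tags, h]
  | case3 c rest strong h ih =>
    rw [renderLoop, if_pos h, segs, if_pos h]
    cases hs : segs (rest.drop 1) with
    | nil => exact absurd hs (segs_ne_nil _)
    | cons a b =>
      rw [hs] at ih
      cases strong <;> simp_all [render', tags]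
  | case4 c rest strong h ih =>
    rw [renderLoop, if_neg h, segs, if_neg h]
    cases hs : segs rest with
    | nil => exact absurd hs (segs_ne_nil _)
    | cons a b =>
      rw [hs] at ih
      simp [render', mapHead, escape_toList, ih]

theorem split_some (s : String) :
    ∃ L, PySem.Str.split? s "**" = some L ∧ L.map String.toList = segs s.toList := by
  have h := PySem.Str.split?_map s "**"
  rw [PySem.Chars.split?] at h
  rw [if_neg (by decide)] at h
  cases hL : PySem.Str.split? s "**" with
  | none => rw [hL] at h; simp at h
  | some L =>
    refine ⟨L, rfl, ?_⟩
    rw [hL] at h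
    simp only [Option.map_some, Option.some.injEq] at h
    rw [h, show ("**".toList) = ['*', '*'] from by decide, splitOn_eq]

-- ===== VERDICT (by name: the statement is the Claim_ definition above) =====
theorem render_inline_spec : Claim_equal_render_inline := by
  intro s sc _
  unfold Spec_render_inline
  apply String.toList_inj.mp
  obtain ⟨L, hL, hmap⟩ := split_some s
  have hA : (render_inline s sc).toList = render' sc false (segs s.toList) := by
    rw [render_inline, PySem.Str.toList_join]
    have : ("" : String).toList = [] := rfl
    rw [this, join_nil_flatten, renderLoop_flatten]
  rw [hA]
  cases L with
  | nil =>
    exfalso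
    exact segs_ne_nil s.toList (by rw [← hmap]; rfl)
  | cons h0 t0 =>
    rw [render_inline_alt, hL]
    simp only [Option.getD_some, List.headD_cons, List.drop_one, List.tail_cons]
    rw [← hmap]
    simp [render', escape_toList, glueB_toList, String.toList_append]
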